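-- pv_equiv track=rewrite | github.com/lukeagibson/HS-SF-Integration | Functions.py | removeDuplicateStudentGroups
-- ===== SOURCE A (Python) =====
-- def removeDuplicateStudentGroups(list_for_removal):
--     new_list_groups = {}
--     list_to_return = []
--     for x,y in enumerate(list_for_removal):
--         new_list_groups[y['Id']] = y['Name']
--     for key,value in new_list_groups.items():
--         d = {}
--         d['Id'] = key
--         d['Name'] = value
--         list_to_return.append(d)
--     return (list_to_return)
-- ===== SOURCE B (Python) =====
-- def removeDuplicateStudentGroups(list_for_removal):
--     list_to_return = []
--     index = {}  # Id -> position of its row in list_to_return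
--     for y in list_for_removal:
--         i = y['Id']
--         pos = index.get(i)
--         if pos is None:
--             index[i] = len(list_to_return)
--             list_to_return.append({'Id': i, 'Name': y['Name']})
--         else:
--             list_to_return[pos]['Name'] = y['Name']
--     return list_to_return
-- ===== Notes on version B (the rewrite author's own statement) =====
-- stated objective: alternative
-- what changed: Replaces A's two passes (build an Id->Name dict, then rebuild a list of dicts from its items) by one pass that maintains the output list directly plus a position index, updating the Name in place when an Id repeats.
import Mathlib
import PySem

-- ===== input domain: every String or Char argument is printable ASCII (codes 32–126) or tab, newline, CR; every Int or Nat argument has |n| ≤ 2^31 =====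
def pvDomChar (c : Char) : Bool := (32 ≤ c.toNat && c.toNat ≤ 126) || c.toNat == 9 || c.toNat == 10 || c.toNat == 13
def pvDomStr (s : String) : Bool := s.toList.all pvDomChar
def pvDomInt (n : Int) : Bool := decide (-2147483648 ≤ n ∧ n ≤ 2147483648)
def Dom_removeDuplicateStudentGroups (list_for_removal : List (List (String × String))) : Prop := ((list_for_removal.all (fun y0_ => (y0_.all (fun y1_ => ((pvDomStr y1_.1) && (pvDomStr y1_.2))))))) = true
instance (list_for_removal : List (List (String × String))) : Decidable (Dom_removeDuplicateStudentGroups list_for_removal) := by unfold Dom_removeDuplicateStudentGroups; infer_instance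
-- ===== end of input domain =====

-- B replaces A's two passes (Id->Name dict, then rebuild rows from its items) by one pass that
-- maintains the output rows directly plus an Id->position index, updating a row's Name in place
-- when an Id repeats (objective: alternative decomposition, same cost).

-- ===== PORT A =====
-- first loop: new_list_groups[y['Id']] = y['Name']   (y['Id'] / y['Name'] succeed under Pre_)
def pvAStep (d : PySem.Dict String String) (y : List (String × String)) : PySem.Dict String String :=
  d.insert ((PySem.Dict.mk y).getD "Id" "") ((PySem.Dict.mk y).getD "Name" "")

def removeDuplicateStudentGroups (list_for_removal : List (List (String × String))) : List (List (String × String)) :=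
  let new_list_groups := list_for_removal.foldl pvAStep PySem.Dict.empty
  -- second loop: d = {}; d['Id'] = key; d['Name'] = value; list_to_return.append(d)
  new_list_groups.items.foldl
    (fun list_to_return kv =>
      list_to_return ++ [((PySem.Dict.empty.insert "Id" kv.1).insert "Name" kv.2).items]) []

-- ===== PORT B =====
-- one step of B's single pass: state = (list_to_return, index)
def pvBStep (st : List (List (String × String)) × PySem.Dict String Nat)
    (y : List (String × String)) : List (List (String × String)) × PySem.Dict String Nat :=
  let i := (PySem.Dict.mk y).getD "Id" ""
  match st.2.get? i with
  | none =>
      (st.1 ++ [[("Id", i), ("Name", (PySem.Dict.mk y).getD "Name" "")]],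
       st.2.insert i st.1.length)
  | some p =>
      (st.1.modify p (fun row => ((PySem.Dict.mk row).insert "Name" ((PySem.Dict.mk y).getD "Name" "")).items),
       st.2)

def removeDuplicateStudentGroups_alt (list_for_removal : List (List (String × String))) : List (List (String × String)) :=
  (list_for_removal.foldl pvBStep ([], PySem.Dict.empty)).1

-- ===== PRECONDITION & SPEC =====
-- Pre_ excludes exactly the rows missing an 'Id' or 'Name' key, on which Python A raises KeyError.
def Pre_removeDuplicateStudentGroups (list_for_removal : List (List (String × String))) : Prop :=
  ∀ y ∈ list_for_removal, (PySem.Dict.mk y).contains "Id" = true ∧ (PySem.Dict.mk y).contains "Name" = true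
instance (list_for_removal : List (List (String × String))) : Decidable (Pre_removeDuplicateStudentGroups list_for_removal) := by unfold Pre_removeDuplicateStudentGroups; infer_instance

def pvWitness_removeDuplicateStudentGroups : (List (List (String × String))) :=
  [[("Id", "1"), ("Name", "Al")], [("Id", "1"), ("Name", "Bo")], [("Id", "2"), ("Name", "Cy")]]

def Spec_removeDuplicateStudentGroups (list_for_removal : List (List (String × String))) (out : List (List (String × String))) : Prop := out = removeDuplicateStudentGroups_alt list_for_removal
instance (list_for_removal : List (List (String × String))) (out : List (List (String × String))) : Decidable (Spec_removeDuplicateStudentGroups list_for_removal out) := by unfold Spec_removeDuplicateStudentGroups; infer_instance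

-- ===== CLAIM (what is proved, stated in full; the proofs are below) =====
def Claim_equal_removeDuplicateStudentGroups : Prop := ∀ (list_for_removal : List (List (String × String))), Dom_removeDuplicateStudentGroups list_for_removal → Pre_removeDuplicateStudentGroups list_for_removal → Spec_removeDuplicateStudentGroups list_for_removal (removeDuplicateStudentGroups list_for_removal)

-- ===== LEMMAS AND PROOFS =====

-- the row A's second loop builds from an items pair
def pvRowOf (kv : String × String) : List (String × String) := [("Id", kv.1), ("Name", kv.2)]

lemma pvRow_build (k v : String) :
    ((PySem.Dict.empty.insert "Id" k).insert "Name" v).items = pvRowOf (k, v) := by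
  rfl

lemma pvRow_setName (k v n : String) :
    ((PySem.Dict.mk (pvRowOf (k, v))).insert "Name" n).items = pvRowOf (k, n) := by
  rfl

-- first-occurrence index through ++ [i]
lemma pv_index?_append_singleton (xs : List String) (i k : String) (h : i ∉ xs) :
    PySem.List.index? (xs ++ [i]) k = if k = i then some xs.length else PySem.List.index? xs k := by
  by_cases hk : k = i
  · subst hk
    rw [if_pos rfl, PySem.List.index?_eq_some_iff]
    exact ⟨xs, [], rfl, rfl, h⟩
  · rw [if_neg hk]
    cases hx : PySem.List.index? xs k with
    | none =>
      have hnx : k ∉ xs := (PySem.List.index?_eq_none_iff xs k).mp hx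
      rw [PySem.List.index?_eq_none_iff]
      simp [hnx, hk]
    | some p =>
      rw [PySem.List.index?_eq_some_iff] at hx ⊢
      obtain ⟨pre, suf, rfl, hl, hnp⟩ := hx
      exact ⟨pre, suf ++ [i], by simp, hl, hnp⟩

lemma pv_invariant (l : List (List (String × String)))
    (d : PySem.Dict String String) (res : List (List (String × String))) (idx : PySem.Dict String Nat)
    (hnd : d.keys.Nodup)
    (hres : res = d.items.map pvRowOf)
    (hidx : ∀ k, idx.get? k = PySem.List.index? d.keys k) :
    (l.foldl pvBStep (res, idx)).1 = (l.foldl pvAStep d).items.map pvRowOf := by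
  induction l generalizing d res idx with
  | nil => simpa using hres
  | cons y t ih =>
    simp only [List.foldl_cons]
    cases hg : idx.get? ((PySem.Dict.mk y).getD "Id" "") with
    | none =>
      have hni : (PySem.Dict.mk y).getD "Id" "" ∉ d.keys := by
        have h0 := hidx ((PySem.Dict.mk y).getD "Id" "")
        rw [hg] at h0
        exact (PySem.List.index?_eq_none_iff _ _).mp h0.symm
      have hc : d.contains ((PySem.Dict.mk y).getD "Id" "") = false := by
        rw [PySem.Dict.contains_eq_decide_mem_keys]
        simp [hni]
      have hb : pvBStep (res, idx) y
          = (res ++ [pvRowOf ((PySem.Dict.mk y).getD "Id" "", (PySem.Dict.mk y).getD "Name" "")],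
             idx.insert ((PySem.Dict.mk y).getD "Id" "") res.length) := by
        simp [pvBStep, hg, pvRowOf]
      rw [hb, show pvAStep d y = d.insert ((PySem.Dict.mk y).getD "Id" "") ((PySem.Dict.mk y).getD "Name" "") from rfl]
      apply ih
      · exact PySem.Dict.nodup_keys_insert _ _ _ hnd
      · rw [PySem.Dict.items_insert_of_not_contains _ _ hc]
        simp [hres]
      · intro k
        rw [PySem.Dict.get?_insert, PySem.Dict.keys_insert_of_not_contains _ _ hc,
            pv_index?_append_singleton _ _ _ hni]
        split_ifs with hk
        · have : res.length = d.keys.length := by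
            rw [hres]
            simp [PySem.Dict.keys]
          rw [this]
        · exact hidx k
    | some p =>
      have h0 := hidx ((PySem.Dict.mk y).getD "Id" "")
      rw [hg] at h0
      obtain ⟨pre, suf, hdk, hlen, hnp⟩ := (PySem.List.index?_eq_some_iff _ _ _).mp h0.symm
      have hmem : (PySem.Dict.mk y).getD "Id" "" ∈ d.keys := by
        rw [hdk]
        simp
      have hc : d.contains ((PySem.Dict.mk y).getD "Id" "") = true := by
        rw [PySem.Dict.contains_eq_decide_mem_keys]
        simp [hmem]
      have hb : pvBStep (res, idx) y
          = (res.modify p (fun row => ((PySem.Dict.mk row).insert "Name" ((PySem.Dict.mk y).getD "Name" "")).items), idx) := by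
        simp [pvBStep, hg]
      rw [hb, show pvAStep d y = d.insert ((PySem.Dict.mk y).getD "Id" "") ((PySem.Dict.mk y).getD "Name" "") from rfl]
      have hplen : p < d.keys.length := by
        rw [hdk]
        simp [← hlen]
      have hkp : d.keys[p]'hplen = (PySem.Dict.mk y).getD "Id" "" := by
        rw [List.getElem_eq_iff hplen, hdk, List.getElem?_append_right (by omega), ← hlen]
        simp
      apply ih
      · rw [PySem.Dict.keys_insert_of_contains _ _ hc]
        exact hnd
      · rw [PySem.Dict.items_insert_of_contains _ _ hc]
        subst hres
        apply List.ext_getElem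
        · simp
        · intro j h1 h2
          have hjlen : j < d.items.length := by
            simpa using h2
          have hklen : j < d.keys.length := by
            simpa [PySem.Dict.keys] using hjlen
          have hkeysj : (d.items[j]'hjlen).1 = d.keys[j]'hklen := by
            simp [PySem.Dict.keys]
          rw [List.getElem_modify]
          by_cases hpj : p = j
          · subst hpj
            have hid : (d.items[p]'hjlen).1 = (PySem.Dict.mk y).getD "Id" "" := by
              rw [hkeysj]
              exact hkp
            simp only [List.getElem_map]
            rw [show pvRowOf (d.items[p]'hjlen) = pvRowOf ((d.items[p]'hjlen).1, (d.items[p]'hjlen).2) from rfl,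
                pvRow_setName]
            simp [pvRowOf, hid]
          · have hne : (d.items[j]'hjlen).1 ≠ (PySem.Dict.mk y).getD "Id" "" := by
              rw [hkeysj, ← hkp]
              intro hcon
              exact hpj (((List.Nodup.getElem_inj_iff hnd).mp hcon).symm)
            simp [if_neg hpj, List.getElem_map, hne]
      · intro k
        rw [PySem.Dict.keys_insert_of_contains _ _ hc]
        exact hidx k

-- ===== VERDICT (by name: the statement is the Claim_ definition above) =====
theorem removeDuplicateStudentGroups_spec : Claim_equal_removeDuplicateStudentGroups := by
  intro l _ _
  unfold Spec_removeDuplicateStudentGroups removeDuplicateStudentGroups removeDuplicateStudentGroups_alt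
  rw [PySem.List.foldl_append_singleton_eq_map]
  rw [pv_invariant l PySem.Dict.empty [] PySem.Dict.empty (by simp [PySem.Dict.keys_empty])
      (by rfl) (by intro k; rfl)]
  apply List.map_congr_left
  intro kv _
  exact pvRow_build kv.1 kv.2
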